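-- pv_equiv track=rewrite | github.com/gvanophem/BasketActionRecognition | MLP_transformer/test_output.py | data_for_iou
-- ===== SOURCE A (Python) =====
-- def data_for_iou(y):
--     detections = []
--     i=0
--     while i<len(y):
--         label = y[i]
--         j = 0
--         while i+j < len(y) and y[i+j] == label:
--             j+=1
--         detections.append([label, i, i+j])
--         i+=j
--     return detections
-- ===== SOURCE B (Python) =====
-- def data_for_iou(y):
--     detections = []
--     for idx, v in enumerate(y):
--         if detections and detections[-1][0] == v:
--             detections[-1][2] = idx + 1
--         else:
--             detections.append([v, idx, idx + 1])
--     return detections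
-- ===== Notes on version B (the rewrite author's own statement) =====
-- stated objective: simpler
-- what changed: Replaces the nested index-advancing while loops with a single enumerate pass that either extends the end of the last open run in place or opens a new run.
import Mathlib
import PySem

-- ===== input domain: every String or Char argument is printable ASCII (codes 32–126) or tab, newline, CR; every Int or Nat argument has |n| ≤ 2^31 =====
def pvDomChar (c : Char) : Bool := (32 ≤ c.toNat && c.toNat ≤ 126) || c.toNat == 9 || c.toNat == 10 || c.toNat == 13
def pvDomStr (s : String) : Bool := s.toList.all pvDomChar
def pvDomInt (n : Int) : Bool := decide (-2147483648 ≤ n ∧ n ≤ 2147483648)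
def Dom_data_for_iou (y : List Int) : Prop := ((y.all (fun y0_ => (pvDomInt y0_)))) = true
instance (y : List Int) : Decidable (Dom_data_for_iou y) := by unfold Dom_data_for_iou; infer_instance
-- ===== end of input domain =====

-- B is a simpler single enumerate pass (extend the last run in place or open a new one)
-- instead of A's nested index-advancing while loops; equal return value, no argument is mutated.

-- ===== PORT A =====
-- inner 'while i+j < len(y) and y[i+j] == label: j += 1' (index always in range, so getD is exact)
def pvCountRun (y : List Int) (label : Int) (i j : Nat) : Nat :=
  if i + j < y.length ∧ y.getD (i + j) 0 = label then pvCountRun y label i (j + 1) else j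
termination_by y.length - (i + j)

-- the inner loop's counter never decreases (used only for pvLoopA's termination)
theorem pvCountRun_ge (y : List Int) (label : Int) (i j : Nat) : j ≤ pvCountRun y label i j := by
  fun_induction pvCountRun y label i j with
  | case1 _ _ ih => omega
  | case2 => omega

-- at i < len(y) with label = y[i] the inner loop runs at least once (for pvLoopA's termination)
theorem pvCountRun_pos (y : List Int) (i : Nat) (h : i < y.length) :
    1 ≤ pvCountRun y (y.getD i 0) i 0 := by
  rw [pvCountRun]
  simp only [Nat.add_zero, h, true_and]
  exact pvCountRun_ge y (y.getD i 0) i 1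

-- outer 'while i < len(y)' loop, accumulating detections
def pvLoopA (y : List Int) (i : Nat) (dets : List (List Int)) : List (List Int) :=
  if _h : i < y.length then
    let label := y.getD i 0
    let j := pvCountRun y label i 0
    pvLoopA y (i + j) (dets ++ [[label, (i : Int), ((i + j : Nat) : Int)]])
  else dets
termination_by y.length - i
decreasing_by have := pvCountRun_pos y i _h; omega

def data_for_iou (y : List Int) : List (List Int) := pvLoopA y 0 []

-- ===== PORT B =====
-- 'for idx, v in enumerate(y): extend detections[-1] in place or append a new [v, idx, idx+1]'
-- (detections[-1][0] and [-1][2] are always in range, so getD / set are exact)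
def data_for_iou_alt (y : List Int) : List (List Int) :=
  (PySem.List.enumerate y 0).foldl
    (fun dets p =>
      match dets.getLast? with
      | some last =>
          if last.getD 0 0 = p.2 then dets.dropLast ++ [last.set 2 (p.1 + 1)]
          else dets ++ [[p.2, p.1, p.1 + 1]]
      | none => dets ++ [[p.2, p.1, p.1 + 1]]) []

-- ===== PRECONDITION & SPEC =====
def Spec_data_for_iou (y : List Int) (out : List (List Int)) : Prop := out = data_for_iou_alt y
instance (y : List Int) (out : List (List Int)) : Decidable (Spec_data_for_iou y out) := by unfold Spec_data_for_iou; infer_instance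

-- ===== CLAIM (what is proved, stated in full; the proofs are below) =====
def Claim_equal_data_for_iou : Prop := ∀ (y : List Int), Dom_data_for_iou y → Spec_data_for_iou y (data_for_iou y)

-- ===== LEMMAS AND PROOFS =====

-- run-length encoding of a list, merging at the front
def pvMergeF (a : Int) : List (Int × Nat) → List (Int × Nat)
  | [] => [(a, 1)]
  | (c, n) :: r => if a = c then (a, n + 1) :: r else (a, 1) :: (c, n) :: r

def pvRle : List Int → List (Int × Nat)
  | [] => []
  | a :: t => pvMergeF a (pvRle t)

-- run-length encoding extended by one element at the back
def pvSnoc (r : List (Int × Nat)) (v : Int) : List (Int × Nat) :=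
  match r with
  | [] => [(v, 1)]
  | x :: r' =>
    match r' with
    | [] => if x.1 = v then [(x.1, x.2 + 1)] else [x, (v, 1)]
    | _ :: _ => x :: pvSnoc r' v

def pvSumLen : List (Int × Nat) → Nat
  | [] => 0
  | x :: r => x.2 + pvSumLen r

-- render runs as [label, start, end] triples
def pvRender : List (Int × Nat) → Nat → List (List Int)
  | [], _ => []
  | (a, n) :: r, s => [a, (s : Int), ((s + n : Nat) : Int)] :: pvRender r (s + n)

theorem pvMergeF_snoc (a : Int) (r : List (Int × Nat)) (v : Int) :
    pvMergeF a (pvSnoc r v) = pvSnoc (pvMergeF a r) v := by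
  match r with
  | [] =>
      by_cases h : a = v <;> simp [pvSnoc, pvMergeF, h]
  | [(b, m)] =>
      by_cases hb : b = v <;> by_cases ha : a = b
      · subst hb; subst ha; simp [pvSnoc, pvMergeF]
      · subst hb; simp [pvSnoc, pvMergeF, ha]
      · subst ha; simp [pvSnoc, pvMergeF, hb]
      · simp [pvSnoc, pvMergeF, ha, hb]
  | (b, m) :: x :: r' =>
      simp only [pvSnoc, pvMergeF]
      by_cases ha : a = b
      · simp [ha, pvSnoc]
      · simp [ha, pvSnoc]

theorem pvRle_concat (p : List Int) (v : Int) : pvRle (p ++ [v]) = pvSnoc (pvRle p) v := by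
  induction p with
  | nil => rfl
  | cons a t ih => simp only [List.cons_append, pvRle, ih, pvMergeF_snoc]

theorem pvSnoc_concat (q : List (Int × Nat)) (a : Int) (n : Nat) (v : Int) :
    pvSnoc (q ++ [(a, n)]) v =
      if a = v then q ++ [(a, n + 1)] else q ++ [(a, n), (v, 1)] := by
  induction q with
  | nil => by_cases h : a = v <;> simp [pvSnoc, h]
  | cons x q' ih =>
      have hne : q' ++ [(a, n)] ≠ [] := by simp
      match hq : q' ++ [(a, n)] with
      | [] => exact absurd hq hne
      | z :: zs =>
          have : pvSnoc (x :: (z :: zs)) v = x :: pvSnoc (z :: zs) v := rfl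
          rw [List.cons_append, hq, this, ← hq, ih]
          by_cases h : a = v <;> simp [h]

theorem pvSumLen_append (q r : List (Int × Nat)) :
    pvSumLen (q ++ r) = pvSumLen q + pvSumLen r := by
  induction q with
  | nil => simp [pvSumLen]
  | cons x q' ih => simp [pvSumLen, ih]; omega

theorem pvRender_concat (q : List (Int × Nat)) (a : Int) (n : Nat) (s : Nat) :
    pvRender (q ++ [(a, n)]) s =
      pvRender q s ++ [[a, ((s + pvSumLen q : Nat) : Int), ((s + pvSumLen q + n : Nat) : Int)]] := by
  induction q generalizing s with
  | nil => simp [pvRender, pvSumLen]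
  | cons x q' ih =>
      match x with
      | (b, m) =>
        simp only [List.cons_append, pvRender, ih, pvSumLen]
        simp [Nat.add_assoc]

theorem pvSumLen_mergeF (a : Int) (r : List (Int × Nat)) :
    pvSumLen (pvMergeF a r) = 1 + pvSumLen r := by
  match r with
  | [] => simp [pvMergeF, pvSumLen]
  | (c, n) :: r' =>
      simp only [pvMergeF]
      by_cases h : a = c
      · simp [h, pvSumLen]; omega
      · simp [h, pvSumLen]

theorem pvSumLen_rle (p : List Int) : pvSumLen (pvRle p) = p.length := by
  induction p with
  | nil => rfl
  | cons a t ih => simp [pvRle, pvSumLen_mergeF, ih]; omega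

theorem pvRle_cons_ex (b : Int) (t : List Int) : ∃ m r, pvRle (b :: t) = (b, m) :: r := by
  show ∃ m r, pvMergeF b (pvRle t) = (b, m) :: r
  match pvRle t with
  | [] => exact ⟨1, [], rfl⟩
  | (c, n) :: r' =>
      by_cases h : b = c
      · exact ⟨n + 1, r', by simp [pvMergeF, h]⟩
      · exact ⟨1, (c, n) :: r', by simp [pvMergeF, h]⟩

theorem pvRle_cons_run (a : Int) (t : List Int) :
    pvRle (a :: t) = (a, 1 + (t.takeWhile (fun x => x == a)).length) ::
      pvRle (t.drop (t.takeWhile (fun x => x == a)).length) := by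
  induction t generalizing a with
  | nil => simp [pvRle, pvMergeF]
  | cons b t' ih =>
      by_cases h : b = a
      · subst h
        have h2 : pvRle (b :: b :: t') = pvMergeF b (pvRle (b :: t')) := rfl
        rw [h2, ih b]
        simp [pvMergeF, List.takeWhile]
        omega
      · obtain ⟨m, r, hr⟩ := pvRle_cons_ex b t'
        have h2 : pvRle (a :: b :: t') = pvMergeF a (pvRle (b :: t')) := rfl
        rw [h2, hr]
        have hba : ¬ (b == a) = true := by simp [h]
        simp [pvMergeF, List.takeWhile, hba, Ne.symm h, ← hr]

theorem pvCountRun_eq (y : List Int) (label : Int) (i j : Nat) :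
    pvCountRun y label i j =
      j + ((y.drop (i + j)).takeWhile (fun x => x == label)).length := by
  fun_induction pvCountRun y label i j with
  | case1 j h ih =>
      obtain ⟨hlt, heq⟩ := h
      have hd : y.drop (i + j) = y[i + j] :: y.drop (i + j + 1) :=
        (List.getElem_cons_drop hlt).symm
      have hg : y[i + j] = label := by
        rw [← heq]; exact (List.getD_eq_getElem y 0 hlt).symm
      rw [← Nat.add_assoc] at ih
      rw [hd]
      simp [List.takeWhile, hg, ih]
      omega
  | case2 j h =>
      rcases Nat.lt_or_ge (i + j) y.length with hlt | hge
      · have heq : ¬ y.getD (i + j) 0 = label := fun hc => h ⟨hlt, hc⟩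
        have hd : y.drop (i + j) = y[i + j] :: y.drop (i + j + 1) :=
          (List.getElem_cons_drop hlt).symm
        have hg : ¬ (y[i + j] == label) = true := by
          simp; rw [← List.getD_eq_getElem y 0 hlt]; exact heq
        rw [hd]
        simp [List.takeWhile, hg]
      · rw [List.drop_eq_nil_of_le hge]
        simp

theorem pvLoopA_eq (y : List Int) (i : Nat) (dets : List (List Int)) :
    pvLoopA y i dets = dets ++ pvRender (pvRle (y.drop i)) i := by
  fun_induction pvLoopA y i dets with
  | case1 i dets h label j ih =>
      have hg : y[i] = label := (List.getD_eq_getElem y 0 h).symm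
      have hd : y.drop i = label :: y.drop (i + 1) := by
        rw [← hg]; exact (List.getElem_cons_drop h).symm
      set k := ((y.drop (i + 1)).takeWhile (fun x => x == label)).length with hk
      have hj : pvCountRun y label i 0 = 1 + k := by
        rw [pvCountRun_eq]
        simp only [Nat.add_zero, hd, List.takeWhile, beq_self_eq_true, List.length_cons, hk]
        omega
      have hj' : j = 1 + k := hj
      rw [ih, hj', hd, pvRle_cons_run, ← hk]
      simp only [pvRender, List.drop_drop]
      have hidx : i + 1 + k = i + (1 + k) := by omega
      rw [hidx, List.append_assoc]
      rfl
  | case2 i dets h =>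
      rw [List.drop_eq_nil_of_le (by omega)]
      simp [pvRle, pvRender]

-- B's loop body, named for the proofs below
def pvStepB (dets : List (List Int)) (p : Int × Int) : List (List Int) :=
  match dets.getLast? with
  | some last =>
      if last.getD 0 0 = p.2 then dets.dropLast ++ [last.set 2 (p.1 + 1)]
      else dets ++ [[p.2, p.1, p.1 + 1]]
  | none => dets ++ [[p.2, p.1, p.1 + 1]]

theorem pvAlt_eq_foldl (y : List Int) :
    data_for_iou_alt y = (PySem.List.enumerate y 0).foldl pvStepB [] := rfl

theorem pvRle_eq_nil_iff (p : List Int) : pvRle p = [] ↔ p = [] := by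
  cases p with
  | nil => simp [pvRle]
  | cons a t =>
      obtain ⟨m, r, hr⟩ := pvRle_cons_ex a t
      simp [hr]

theorem pvFoldB_eq (y : List Int) :
    (PySem.List.enumerate y 0).foldl pvStepB [] = pvRender (pvRle y) 0 := by
  induction y using List.reverseRecOn with
  | nil => rfl
  | append_singleton p v ih =>
      rw [PySem.List.enumerate_append, List.foldl_append, ih]
      have henum : PySem.List.enumerate [v] (0 + (p.length : Int)) =
          [((p.length : Int), v)] := by
        simp [PySem.List.enumerate_cons, PySem.List.enumerate_nil]
      rw [henum, List.foldl_cons, List.foldl_nil, pvRle_concat]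
      rcases List.eq_nil_or_concat (pvRle p) with hnil | ⟨q, an, hq⟩
      · have hp : p = [] := (pvRle_eq_nil_iff p).mp hnil
        subst hp
        simp only [hnil, pvRender, pvSnoc, pvStepB, List.getLast?_nil,
          List.nil_append, List.length_nil]
        norm_num [pvRender, pvSumLen]
      · obtain ⟨a, n⟩ := an
        rw [List.concat_eq_append] at hq
        have hS : pvSumLen q + n = p.length := by
          have h1 := pvSumLen_rle p
          rw [hq, pvSumLen_append] at h1
          simpa [pvSumLen] using h1
        rw [hq, pvRender_concat, pvSnoc_concat]
        set S := pvSumLen q with hSdef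
        have hlast : (pvRender q 0 ++
            [[a, ((0 + S : Nat) : Int), ((0 + S + n : Nat) : Int)]]).getLast? =
            some [a, ((0 + S : Nat) : Int), ((0 + S + n : Nat) : Int)] :=
          List.getLast?_concat
        simp only [pvStepB, hlast, List.dropLast_concat, List.getD_cons_zero]
        by_cases hav : a = v
        · rw [if_pos hav, if_pos hav, pvRender_concat]
          simp only [List.set, List.append_cancel_left_eq, List.cons.injEq, and_true, true_and]
          constructor <;> push_cast <;> omega
        · rw [if_neg hav, if_neg hav]
          have hsplit : q ++ [(a, n), (v, 1)] = (q ++ [(a, n)]) ++ [(v, 1)] := by simp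
          rw [hsplit, pvRender_concat, pvRender_concat, pvSumLen_append]
          simp only [List.append_assoc, List.append_cancel_left_eq, pvSumLen]
          have h1 : 0 + (pvSumLen q + (n + 0)) = p.length := by omega
          rw [h1]
          norm_num
          exact hSdef

-- ===== VERDICT (by name: the statement is the Claim_ definition above) =====
theorem data_for_iou_spec : Claim_equal_data_for_iou := by
  intro y _
  show data_for_iou y = data_for_iou_alt y
  rw [data_for_iou, pvLoopA_eq, pvAlt_eq_foldl, pvFoldB_eq]
  simp
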